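-- pv_equiv track=rewrite | github.com/shion1305/YLabRoute21_VulnResearch | DataGrouper.py | groupByDestIp
-- ===== SOURCE A (Python) =====
-- def groupByDestIp(data):
--     """Collect only ip"""
--     result = {}
--     for d in data:
--         geo_ip = d['_source']['destination_ip']
--         # もしもgeo_ipがresultフィールドになかった場合
--         if not geo_ip in result:
--             result[geo_ip] = []
--         result[geo_ip].append(d)
--     return result
-- ===== SOURCE B (Python) =====
-- def groupByDestIp(data):
--     """Collect only ip"""
--     keys = []
--     for d in data:
--         k = d['_source']['destination_ip']
--         if k not in keys:
--             keys.append(k)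
--     return {k: [d for d in data if d['_source']['destination_ip'] == k]
--             for k in keys}
-- ===== Notes on version B (the rewrite author's own statement) =====
-- stated objective: alternative
-- what changed: Replaces the single-pass dict bucketing with a two-phase plan: first collect the distinct destination IPs in first-occurrence order, then build each group by filtering the whole list per key in a dict comprehension.
import Mathlib
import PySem

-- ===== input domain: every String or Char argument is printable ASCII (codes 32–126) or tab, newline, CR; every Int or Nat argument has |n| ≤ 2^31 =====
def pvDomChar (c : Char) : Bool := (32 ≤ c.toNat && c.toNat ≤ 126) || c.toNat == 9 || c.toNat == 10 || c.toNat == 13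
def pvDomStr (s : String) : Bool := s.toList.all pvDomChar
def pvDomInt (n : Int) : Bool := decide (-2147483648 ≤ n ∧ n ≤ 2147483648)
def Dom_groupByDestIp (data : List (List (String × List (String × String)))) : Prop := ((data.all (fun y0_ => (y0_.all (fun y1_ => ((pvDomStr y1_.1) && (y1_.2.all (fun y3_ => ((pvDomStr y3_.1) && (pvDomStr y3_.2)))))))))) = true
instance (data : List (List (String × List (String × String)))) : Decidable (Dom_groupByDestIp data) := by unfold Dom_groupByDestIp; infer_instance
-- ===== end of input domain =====

-- B replaces A's one-pass dict bucketing by collecting the distinct keys first and then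
-- filtering the whole list once per key (alternative decomposition, no speed claim).

-- ===== PORT A =====
-- d['_source']['destination_ip'] (getD defaults are unreachable under Pre_)
def pvKey (r : List (String × List (String × String))) : String :=
  ((PySem.Dict.mk (((PySem.Dict.mk r).get? "_source").getD [])).get? "destination_ip").getD ""

def groupByDestIp (data : List (List (String × List (String × String)))) : List (String × List (List (String × List (String × String)))) :=
  (data.foldl
    (fun result r =>
      let k := pvKey r
      let result := if result.contains k then result else result.insert k []
      result.modify k [] (fun g => g ++ [r]))
    PySem.Dict.empty).items

-- ===== PORT B =====
def groupByDestIp_alt (data : List (List (String × List (String × String)))) : List (String × List (List (String × List (String × String)))) :=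
  let keys := data.foldl (fun ks r => let k := pvKey r; if k ∈ ks then ks else ks ++ [k]) []
  keys.map (fun k => (k, data.filter (fun r => pvKey r == k)))

-- ===== PRECONDITION & SPEC =====
-- Pre_ excludes exactly the inputs on which A raises KeyError: a record without
-- the '_source' key or whose '_source' dict lacks 'destination_ip' (B raises there too).
def Pre_groupByDestIp (data : List (List (String × List (String × String)))) : Prop :=
  ∀ r ∈ data, (((PySem.Dict.mk r).get? "_source").bind
      (fun src => (PySem.Dict.mk src).get? "destination_ip")).isSome = true
instance (data : List (List (String × List (String × String)))) : Decidable (Pre_groupByDestIp data) := by unfold Pre_groupByDestIp; infer_instance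

def pvWitness_groupByDestIp : (List (List (String × List (String × String)))) :=
  [[("_source", [("destination_ip", "1.2.3.4")])],
   [("_source", [("destination_ip", "5.6.7.8"), ("port", "80")])]]

def Spec_groupByDestIp (data : List (List (String × List (String × String)))) (out : List (String × List (List (String × List (String × String))))) : Prop := out = groupByDestIp_alt data
instance (data : List (List (String × List (String × String)))) (out : List (String × List (List (String × List (String × String))))) : Decidable (Spec_groupByDestIp data out) := by
  unfold Spec_groupByDestIp
  -- instance search exceeds its default size on this deeply nested type; assemble it explicitly
  letI i1 : DecidableEq (List (String × List (String × String))) := inferInstance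
  letI i2 : DecidableEq (List (List (String × List (String × String)))) := @instDecidableEqList _ i1
  letI i3 : DecidableEq (String × List (List (String × List (String × String)))) := @instDecidableEqProd _ _ _ i2
  exact @instDecidableEqList _ i3 out (groupByDestIp_alt data)

-- ===== CLAIM (what is proved, stated in full; the proofs are below) =====
def Claim_equal_groupByDestIp : Prop := ∀ (data : List (List (String × List (String × String)))), Dom_groupByDestIp data → Pre_groupByDestIp data → Spec_groupByDestIp data (groupByDestIp data)

-- ===== LEMMAS AND PROOFS =====

-- A's "ensure key, then append" step is one Dict.modify.
theorem pv_step_eq (res : PySem.Dict String (List (List (String × List (String × String)))))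
    (r : List (String × List (String × String))) :
    (let k := pvKey r
     let res' := if res.contains k then res else res.insert k []
     res'.modify k [] (fun g => g ++ [r])) = res.modify (pvKey r) [] (fun g => g ++ [r]) := by
  by_cases h : res.contains (pvKey r)
  · simp [h]
  · have h0 : res.getD (pvKey r) [] = [] :=
      PySem.Dict.getD_of_not_contains res [] (by simpa using h)
    simp [h, PySem.Dict.modify, PySem.Dict.getD_insert_self, PySem.Dict.insert_insert_self, h0]

theorem pv_foldlA_eq (data : List (List (String × List (String × String)))) :
    (data.foldl
      (fun result r =>
        let k := pvKey r
        let result := if result.contains k then result else result.insert k []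
        result.modify k [] (fun g => g ++ [r]))
      PySem.Dict.empty) =
    ((data.map (fun r => (pvKey r, r))).foldl
      (fun d p => d.modify p.1 [] (fun g => g ++ [p.2])) PySem.Dict.empty) := by
  rw [List.foldl_map]
  exact (PySem.List.foldl_congr_mem data _ _ _ (fun d r _ => (pv_step_eq d r).symm)).symm

-- ===== VERDICT (by name: the statement is the Claim_ definition above) =====
theorem groupByDestIp_spec : Claim_equal_groupByDestIp := by
  intro data _ _
  unfold Spec_groupByDestIp groupByDestIp groupByDestIp_alt
  rw [pv_foldlA_eq]
  have hkeys : ((data.map (fun r => (pvKey r, r))).foldl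
      (fun d p => d.modify p.1 [] (fun g => g ++ [p.2])) PySem.Dict.empty).keys
      = PySem.Set.ofList (data.map pvKey) := by
    have := PySem.Dict.keys_foldl_modify_key (data.map (fun r => (pvKey r, r)))
      (Prod.fst) [] (fun _ p g => g ++ [p.2]) PySem.Dict.empty
    simpa [List.map_map, Function.comp, PySem.Dict.keys_empty,
      PySem.Set.update_empty] using this
  have hnodup : ((data.map (fun r => (pvKey r, r))).foldl
      (fun d p => d.modify p.1 [] (fun g => g ++ [p.2])) PySem.Dict.empty).keys.Nodup := by
    exact PySem.Dict.nodup_keys_foldl_modify_key _ (Prod.fst) [] (fun _ p g => g ++ [p.2])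
      _ (by simp [PySem.Dict.keys_empty])
  rw [PySem.Dict.items_eq_map_keys _ hnodup []]
  rw [hkeys]
  have hB : (data.foldl (fun ks r => let k := pvKey r; if k ∈ ks then ks else ks ++ [k])
      ([] : List String)) = PySem.Set.ofList (data.map pvKey) := by
    rw [← PySem.Set.update_empty, PySem.Set.update_map_eq_foldl_add]
    exact PySem.List.foldl_congr_mem data _ _ _ (fun s r _ => by
      simp [PySem.Set.add_eq_ite])
  rw [hB]
  refine List.map_congr_left (fun k _ => ?_)
  have hg := PySem.Dict.getD_foldl_modify_append (data.map (fun r => (pvKey r, r)))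
    PySem.Dict.empty k
  simp only [PySem.Dict.getD_empty, List.nil_append] at hg
  rw [hg]
  simp [List.filter_map, Function.comp_def]
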